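-- pv_equiv track=rewrite | github.com/Cherp74/research-os | backend/app/core/verifier.py | _find_best_excerpt
-- ===== SOURCE A (Python) =====
-- from typing import List, Tuple, Optional
--
-- def _find_best_excerpt(
--
--     words: List[str],
--     text: str,
--     context: int = 200
-- ) -> str:
--     """Find the best excerpt containing the key words."""
--     text_lower = text.lower()
--
--     # Find position with most word matches
--     best_pos = 0
--     best_count = 0
--
--     for i in range(0, len(text) - 100, 50):
--         window = text_lower[i:i+200]
--         count = sum(1 for word in words if word in window)
--         if count > best_count:
--             best_count = count
--             best_pos = i
--
--     # Extract with context
--     start = max(0, best_pos - context)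
--     end = min(len(text), best_pos + context * 2)
--
--     excerpt = text[start:end]
--     if start > 0:
--         excerpt = "..." + excerpt
--     if end < len(text):
--         excerpt = excerpt + "..."
--
--     return excerpt
-- ===== SOURCE B (Python) =====
-- from typing import List
--
--
-- def _hit_windows(text_lower: str, n: int, num: int, word: str) -> set:
--     """Window indices k (window = text[50*k : 50*k+200]) whose window contains word."""
--     w = len(word)
--     hit = set()
--     for p in range(n - w + 1):
--         if text_lower[p:p + w] == word:
--             klo = max(0, -((200 - w - p) // 50))  # ceil((p + w - 200) / 50)
--             khi = min(num - 1, p // 50)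
--             for k in range(klo, khi + 1):
--                 hit.add(k)
--     return hit
--
--
-- def _find_best_excerpt(
--     words: List[str],
--     text: str,
--     context: int = 200
-- ) -> str:
--     """Occurrence-sweep variant: find each word's match positions once, mark the
--     few windows each occurrence can serve by interval arithmetic, and read the
--     best window off the resulting sparse per-window counter."""
--     text_lower = text.lower()
--     n = len(text)
--     num = len(range(0, n - 100, 50))
--
--     # cnt[k] = how many of the words occur inside the window starting at 50*k
--     cnt = {}
--     for word in words:
--         for k in _hit_windows(text_lower, n, num, word):
--             cnt[k] = cnt.get(k, 0) + 1
--
--     best_pos = 0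
--     best_count = 0
--     for k in range(num):
--         c = cnt.get(k, 0)
--         if c > best_count:
--             best_count = c
--             best_pos = 50 * k
--
--     start = max(0, best_pos - context)
--     end = min(n, best_pos + context * 2)
--
--     excerpt = text[start:end]
--     if start > 0:
--         excerpt = "..." + excerpt
--     if end < n:
--         excerpt = excerpt + "..."
--
--     return excerpt
-- ===== Notes on version B (the rewrite author's own statement) =====
-- stated objective: alternative
-- what changed: B precomputes, once per word, the list of all occurrence positions of that word in the lowered text, and then scores each candidate window by interval arithmetic over those positions, instead of A's substring search inside a freshly sliced 200-char window for every (window, word) pair.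
import Mathlib
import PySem

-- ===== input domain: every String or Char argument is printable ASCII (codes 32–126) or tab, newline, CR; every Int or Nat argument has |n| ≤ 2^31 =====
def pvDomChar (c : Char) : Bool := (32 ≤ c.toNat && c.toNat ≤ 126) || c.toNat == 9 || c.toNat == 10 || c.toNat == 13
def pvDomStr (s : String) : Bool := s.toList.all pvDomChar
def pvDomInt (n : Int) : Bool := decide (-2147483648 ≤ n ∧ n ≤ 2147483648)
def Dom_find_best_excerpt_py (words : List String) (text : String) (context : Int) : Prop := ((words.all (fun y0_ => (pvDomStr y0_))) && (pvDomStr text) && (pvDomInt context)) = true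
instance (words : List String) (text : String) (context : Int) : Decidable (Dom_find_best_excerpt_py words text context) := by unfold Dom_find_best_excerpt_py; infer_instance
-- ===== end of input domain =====

-- B replaces A's per-window substring searches by one occurrence sweep per word that marks,
-- with interval arithmetic, the few windows each occurrence can serve (objective: alternative).

-- ===== PORT A =====
def find_best_excerpt_py (words : List String) (text : String) (context : Int) : String :=
  let tl := PySem.Chars.lower text.toList
  let n : Int := (text.toList.length : Int)
  let best := (PySem.List.pyRange 0 (n - 100) 50).foldl
      (fun (b : Int × Int) i =>
        let window := PySem.List.slice tl (some i) (some (i + 200))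
        let count : Int := (words.map (fun word => if PySem.Chars.isIn word.toList window then (1 : Int) else 0)).sum
        if b.2 < count then (i, count) else b) (0, 0)
  let start := max 0 (best.1 - context)
  let stop := min n (best.1 + context * 2)
  let excerpt := PySem.List.slice text.toList (some start) (some stop)
  let excerpt := if 0 < start then "...".toList ++ excerpt else excerpt
  let excerpt := if stop < n then excerpt ++ "...".toList else excerpt
  String.ofList excerpt

-- ===== PORT B =====
-- helper of Source B: indices k of the windows text[50*k : 50*k+200] that contain `word`
def pvB_hit (tl : List Char) (n num : Int) (word : String) : PySem.Set Int :=
  let w : Int := (word.toList.length : Int)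
  (PySem.List.pyRange 0 (n - w + 1) 1).foldl (fun hit p =>
    if PySem.List.slice tl (some p) (some (p + w)) == word.toList then
      (PySem.List.pyRange (max 0 (-(PySem.Int.floordiv (200 - w - p) 50)))
          (min (num - 1) (PySem.Int.floordiv p 50) + 1) 1).foldl
        (fun hit k => hit.add k) hit
    else hit) (PySem.Set.ofList [])

def find_best_excerpt_py_alt (words : List String) (text : String) (context : Int) : String :=
  let tl := PySem.Chars.lower text.toList
  let n : Int := (text.toList.length : Int)
  let num : Int := ((PySem.List.pyRange 0 (n - 100) 50).length : Int)
  let cnt : PySem.Dict Int Int := words.foldl (fun cnt word =>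
      (pvB_hit tl n num word).foldl (fun cnt k => cnt.modify k 0 (· + 1)) cnt) PySem.Dict.empty
  let best := (PySem.List.pyRange 0 num 1).foldl
      (fun (b : Int × Int) k =>
        let c := cnt.getD k 0
        if b.2 < c then (50 * k, c) else b) (0, 0)
  let start := max 0 (best.1 - context)
  let stop := min n (best.1 + context * 2)
  let excerpt := PySem.List.slice text.toList (some start) (some stop)
  let excerpt := if 0 < start then "...".toList ++ excerpt else excerpt
  let excerpt := if stop < n then excerpt ++ "...".toList else excerpt
  String.ofList excerpt

-- ===== PRECONDITION & SPEC =====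
def Spec_find_best_excerpt_py (words : List String) (text : String) (context : Int) (out : String) : Prop := out = find_best_excerpt_py_alt words text context
instance (words : List String) (text : String) (context : Int) (out : String) : Decidable (Spec_find_best_excerpt_py words text context out) := by unfold Spec_find_best_excerpt_py; infer_instance

-- ===== CLAIM (what is proved, stated in full; the proofs are below) =====
def Claim_equal_find_best_excerpt_py : Prop := ∀ (words : List String) (text : String) (context : Int), Dom_find_best_excerpt_py words text context → Spec_find_best_excerpt_py words text context (find_best_excerpt_py words text context)

-- ===== LEMMAS AND PROOFS =====

theorem pv_lower_length (s : List Char) : (PySem.Chars.lower s).length = s.length := by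
  simp [PySem.Chars.lower]

-- occurrence positions of `word` inside the lowered text `tl` of (int) length n
def pvB_occ (tl : List Char) (n : Int) (word : String) : List Int :=
  (PySem.List.pyRange 0 (n - (word.toList.length : Int) + 1) 1).filter
    (fun p => PySem.List.slice tl (some p) (some (p + (word.toList.length : Int))) == word.toList)

-- the crux, on raw char lists: `cs in text_lower[i:i+200]` iff some occurrence
-- position of cs in text_lower lands in the window interval
theorem pv_window_core (tl : List Char) (cs : List Char) (n i : Int)
    (hn : n = (tl.length : Int)) (hi : 0 ≤ i) (hin : i < n - 100) :
    PySem.Chars.isIn cs (PySem.List.slice tl (some i) (some (i + 200))) =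
      ((PySem.List.pyRange 0 (n - (cs.length : Int) + 1) 1).filter
        (fun p => PySem.List.slice tl (some p) (some (p + (cs.length : Int))) == cs)).any
        (fun p => decide (i ≤ p ∧ p + (cs.length : Int) ≤ i + 200)) := by
  have h0 : (0:Int) ≤ i + 200 := by omega
  rw [PySem.List.slice_toNat tl hi h0]
  have h200 : (i + 200).toNat - i.toNat = 200 := by omega
  rw [h200, Bool.eq_iff_iff, ← PySem.Chars.exists_prefix_drop_iff_isIn]
  simp only [List.any_eq_true, List.mem_filter, PySem.List.mem_pyRange_one, beq_iff_eq,
    decide_eq_true_eq]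
  constructor
  · rintro ⟨j, hj⟩
    rw [List.drop_take, List.drop_drop, List.prefix_take_iff] at hj
    obtain ⟨hpre, hlen⟩ := hj
    by_cases hw0 : cs.length = 0
    · have hnil : cs = [] := by cases cs with | nil => rfl | cons a l => simp at hw0
      subst hnil
      refine ⟨i, ⟨⟨hi, by omega⟩, ?_⟩, by omega⟩
      simp [PySem.List.slice_toNat tl hi hi]
    · have hlen2 : cs.length ≤ (List.drop (i.toNat + j) tl).length := hpre.length_le
      rw [List.length_drop] at hlen2
      refine ⟨i + (j : Int), ⟨⟨by omega, by omega⟩, ?_⟩, by omega⟩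
      rw [PySem.List.slice_toNat tl (by omega) (by omega)]
      have e1 : (i + (j:Int) + (cs.length:Int)).toNat - (i + (j:Int)).toNat = cs.length := by omega
      have e2 : (i + (j:Int)).toNat = i.toNat + j := by omega
      rw [e1, e2]
      exact (List.prefix_iff_eq_take.mp hpre).symm
  · rintro ⟨p, ⟨⟨hp0, hpn⟩, hslice⟩, hip, hpw⟩
    refine ⟨(p - i).toNat, ?_⟩
    rw [List.drop_take, List.drop_drop, List.prefix_take_iff]
    have hptn : i.toNat + (p - i).toNat = p.toNat := by omega
    rw [hptn]
    refine ⟨?_, by omega⟩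
    rw [PySem.List.slice_toNat tl hp0 (by omega)] at hslice
    have e3 : (p + (cs.length:Int)).toNat - p.toNat = cs.length := by omega
    rw [e3] at hslice
    exact List.prefix_iff_eq_take.mpr hslice.symm

-- the same, phrased for the occurrence list
theorem pv_window_iff (tl : List Char) (word : String) (n i : Int)
    (hn : n = (tl.length : Int)) (hi : 0 ≤ i) (hin : i < n - 100) :
    PySem.Chars.isIn word.toList (PySem.List.slice tl (some i) (some (i + 200))) =
      (pvB_occ tl n word).any
        (fun p => decide (i ≤ p ∧ p + (word.toList.length : Int) ≤ i + 200)) := by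
  unfold pvB_occ
  exact pv_window_core tl word.toList n i hn hi hin

-- membership after folding plain set-adds
theorem pv_mem_foldl_add (ks : List Int) (s : PySem.Set Int) (k : Int) :
    k ∈ ks.foldl (fun s x => PySem.Set.add s x) s ↔ k ∈ s ∨ k ∈ ks := by
  induction ks generalizing s with
  | nil => simp
  | cons a l ih =>
    simp only [List.foldl_cons, ih, PySem.Set.mem_add, List.mem_cons]
    tauto

theorem pv_nodup_foldl_add (ks : List Int) (s : PySem.Set Int) (h : List.Nodup s) :
    List.Nodup (ks.foldl (fun s x => PySem.Set.add s x) s) := by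
  induction ks generalizing s with
  | nil => exact h
  | cons a l ih => exact ih _ (PySem.Set.nodup_add s a h)

-- membership in the marking fold over the occurrence list
theorem pv_mem_mark (occ : List Int) (g : Int → List Int) (s : PySem.Set Int) (k : Int) :
    k ∈ occ.foldl (fun s p => (g p).foldl (fun s x => PySem.Set.add s x) s) s ↔
      k ∈ s ∨ ∃ p ∈ occ, k ∈ g p := by
  induction occ generalizing s with
  | nil => simp
  | cons a l ih =>
    simp only [List.foldl_cons, ih, pv_mem_foldl_add, List.mem_cons]
    constructor
    · rintro (⟨h | h⟩ | ⟨p, hp, hk⟩)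
      · exact Or.inl h
      · exact Or.inr ⟨a, Or.inl rfl, h⟩
      · exact Or.inr ⟨p, Or.inr hp, hk⟩
    · rintro (h | ⟨p, (rfl | hp), hk⟩)
      · exact Or.inl (Or.inl h)
      · exact Or.inl (Or.inr hk)
      · exact Or.inr ⟨p, hp, hk⟩

theorem pv_nodup_mark (occ : List Int) (g : Int → List Int) (s : PySem.Set Int)
    (h : List.Nodup s) :
    List.Nodup (occ.foldl (fun s p => (g p).foldl (fun s x => PySem.Set.add s x) s) s) := by
  induction occ generalizing s with
  | nil => exact h
  | cons a l ih => exact ih _ (pv_nodup_foldl_add _ _ h)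

-- characterization of the hit-window set
theorem pv_hit_mem (tl : List Char) (n num : Int) (word : String) (k : Int) :
    k ∈ pvB_hit tl n num word ↔
      ∃ p ∈ pvB_occ tl n word,
        max 0 (-(PySem.Int.floordiv (200 - (word.toList.length : Int) - p) 50)) ≤ k ∧
        k < min (num - 1) (PySem.Int.floordiv p 50) + 1 := by
  unfold pvB_hit pvB_occ
  rw [← List.foldl_filter]
  rw [pv_mem_mark]
  simp [PySem.List.mem_pyRange_one]

theorem pv_hit_nodup (tl : List Char) (n num : Int) (word : String) :
    List.Nodup (pvB_hit tl n num word) := by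
  unfold pvB_hit
  rw [← List.foldl_filter]
  exact pv_nodup_mark _ _ _ (PySem.Set.nodup_ofList [])

-- the interval arithmetic of the marking: k is marked by p iff the window at 50*k covers p
theorem pv_interval (w p k num : Int) (hk0 : 0 ≤ k) (hkn : k < num) :
    (max 0 (-(PySem.Int.floordiv (200 - w - p) 50)) ≤ k ∧
      k < min (num - 1) (PySem.Int.floordiv p 50) + 1) ↔
    (50 * k ≤ p ∧ p + w ≤ 50 * k + 200) := by
  rw [PySem.Int.floordiv_eq_ediv_of_pos (by norm_num : (0:Int) < 50),
    PySem.Int.floordiv_eq_ediv_of_pos (by norm_num : (0:Int) < 50)]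
  omega

-- the counter dict: lookup = how many words hit window k
theorem pv_cnt_getD (tl : List Char) (n num : Int) (words : List String)
    (d : PySem.Dict Int Int) (k : Int) :
    ((words.foldl (fun cnt word =>
        (pvB_hit tl n num word).foldl (fun cnt k => cnt.modify k 0 (· + 1)) cnt) d).getD k 0)
      = d.getD k 0 + (List.countP (fun word => decide (k ∈ pvB_hit tl n num word)) words : Int) := by
  induction words generalizing d with
  | nil => simp
  | cons a ws ih =>
    simp only [List.foldl_cons, List.countP_cons]
    rw [ih, PySem.Dict.getD_foldl_modify_add_one]
    by_cases hm : k ∈ pvB_hit tl n num a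
    · rw [List.count_eq_one_of_mem (pv_hit_nodup tl n num a) hm]
      simp [hm]
      omega
    · rw [List.count_eq_zero.mpr hm]
      simp [hm]

-- the window score of A equals the counter value of B, window by window
theorem pv_count_eq (words : List String) (tl : List Char) (n num k : Int)
    (hn : n = (tl.length : Int))
    (hnum : num = ((PySem.List.pyRange 0 (n - 100) 50).length : Int))
    (hk0 : 0 ≤ k) (hkn : k < num) :
    ((words.map (fun word =>
        if PySem.Chars.isIn word.toList (PySem.List.slice tl (some (50 * k)) (some (50 * k + 200))) then (1 : Int) else 0)).sum)
      = ((words.foldl (fun cnt word =>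
          (pvB_hit tl n num word).foldl (fun cnt k => cnt.modify k 0 (· + 1)) cnt) PySem.Dict.empty).getD k 0) := by
  have hwin : 50 * k < n - 100 := by
    rw [PySem.List.pyRange_of_pos 0 (n - 100) (by norm_num : (0:Int) < 50)] at hnum
    simp only [List.length_map, List.length_range] at hnum
    split at hnum <;> omega
  rw [pv_cnt_getD, PySem.List.sum_map_ite_one_zero]
  have hd0 : (PySem.Dict.empty : PySem.Dict Int Int).getD k 0 = 0 := by rfl
  rw [hd0, zero_add]
  congr 1
  apply List.countP_congr
  intro word hw
  rw [pv_window_iff tl word n (50 * k) hn (by omega) hwin]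
  simp only [List.any_eq_true, decide_eq_true_eq, pv_hit_mem]
  constructor
  · rintro ⟨p, hp, h1, h2⟩
    exact ⟨p, hp, (pv_interval _ p k num hk0 hkn).mpr ⟨h1, by omega⟩⟩
  · rintro ⟨p, hp, h⟩
    obtain ⟨h1, h2⟩ := (pv_interval _ p k num hk0 hkn).mp h
    exact ⟨p, hp, h1, by omega⟩

-- the two window-search folds coincide
theorem pv_fold_eq (words : List String) (tl : List Char) (n num : Int)
    (hn : n = (tl.length : Int))
    (hnum : num = ((PySem.List.pyRange 0 (n - 100) 50).length : Int)) :
    ((PySem.List.pyRange 0 (n - 100) 50).foldl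
      (fun (b : Int × Int) i =>
        let window := PySem.List.slice tl (some i) (some (i + 200))
        let count : Int := (words.map (fun word => if PySem.Chars.isIn word.toList window then (1 : Int) else 0)).sum
        if b.2 < count then (i, count) else b) (0, 0)) =
    ((PySem.List.pyRange 0 num 1).foldl
      (fun (b : Int × Int) k =>
        let c := (words.foldl (fun cnt word =>
            (pvB_hit tl n num word).foldl (fun cnt k => cnt.modify k 0 (· + 1)) cnt) PySem.Dict.empty).getD k 0
        if b.2 < c then (50 * k, c) else b) (0, 0)) := by
  have hm : ((PySem.List.pyRange 0 (n - 100) 50).length : Int) = num := hnum.symm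
  rw [PySem.List.pyRange_of_pos 0 (n - 100) (by norm_num : (0:Int) < 50),
    PySem.List.pyRange_of_pos 0 num (by norm_num : (0:Int) < 1)]
  rw [PySem.List.pyRange_of_pos 0 (n - 100) (by norm_num : (0:Int) < 50)] at hm
  simp only [List.length_map, List.length_range] at hm
  have hsame : (if (0:Int) < num then ((num - 0 + 1 - 1) / 1).toNat else 0)
      = (if (0:Int) < n - 100 then ((n - 100 - 0 + 50 - 1) / 50).toNat else 0) := by
    split at hm <;> split <;> omega
  rw [hsame]
  rw [List.foldl_map, List.foldl_map]
  apply PySem.List.foldl_congr_mem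
  intro acc x hx
  rw [List.mem_range] at hx
  have hxnum : ((x : Int)) < num := by
    exact hm ▸ Int.ofNat_lt.mpr hx
  dsimp only
  simp only [zero_add, one_mul]
  rw [pv_count_eq words tl n num (x:Int) hn hnum (by omega) hxnum]

theorem pv_main (words : List String) (text : String) (context : Int) :
    find_best_excerpt_py words text context = find_best_excerpt_py_alt words text context := by
  unfold find_best_excerpt_py find_best_excerpt_py_alt
  dsimp only
  rw [pv_fold_eq words (PySem.Chars.lower text.toList) ((text.toList.length : Int))
    (((PySem.List.pyRange 0 ((text.toList.length : Int) - 100) 50).length : Int))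
    (by rw [pv_lower_length]) rfl]

-- ===== VERDICT (by name: the statement is the Claim_ definition above) =====
theorem find_best_excerpt_py_spec : Claim_equal_find_best_excerpt_py := by
  intro words text context _
  exact pv_main words text context
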